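-- pv_equiv track=rewrite | github.com/dasl-/pifi | pifi/screensaver/textutils.py | get_word_line_positions
-- ===== SOURCE A (Python) =====
-- def get_word_line_positions(word_timings, max_chars_per_line):
--     """Calculate which line each word belongs to when text is wrapped.
--
--     Args:
--         word_timings: List of (timestamp, word) tuples
--         max_chars_per_line: Maximum characters per line
--
--     Returns:
--         List of (line_index, char_offset_in_line) for each word
--     """
--     positions = []
--     current_line = 0
--     current_char = 0
--
--     for _, word in word_timings:
--         word_len = len(word)
--
--         # Check if word fits on current line
--         if current_char > 0 and current_char + 1 + word_len > max_chars_per_line: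
--             # Move to next line
--             current_line += 1
--             current_char = 0
--
--         positions.append((current_line, current_char))
--         current_char += word_len + 1  # +1 for space
--
--     return positions
-- ===== SOURCE B (Python) =====
-- def get_word_line_positions(word_timings, max_chars_per_line):
--     """Two-pass version: first greedily group words into wrapped lines,
--     then assign (line_index, char_offset) per word within each line."""
--     # Pass 1: group word lengths into lines.
--     lines = []
--     current = []
--     for _, word in word_timings:
--         n = len(word)
--         if current and sum(x + 1 for x in current) + 1 + n > max_chars_per_line:
--             lines.append(current)
--             current = [n]
--         else:
--             current = current + [n]
--     if current:
--         lines.append(current)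
--     # Pass 2: positions from the grouped lines.
--     positions = []
--     for i, line in enumerate(lines):
--         offset = 0
--         for n in line:
--             positions.append((i, offset))
--             offset += n + 1
--     return positions
-- ===== Notes on version B (the rewrite author's own statement) =====
-- stated objective: alternative
-- what changed: Replaces the single running-counter loop with a two-pass decomposition: first greedily group word lengths into wrapped lines (fit test recomputed per line), then a nested pass over the grouped lines emits (line_index, char_offset) per word.
import Mathlib
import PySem

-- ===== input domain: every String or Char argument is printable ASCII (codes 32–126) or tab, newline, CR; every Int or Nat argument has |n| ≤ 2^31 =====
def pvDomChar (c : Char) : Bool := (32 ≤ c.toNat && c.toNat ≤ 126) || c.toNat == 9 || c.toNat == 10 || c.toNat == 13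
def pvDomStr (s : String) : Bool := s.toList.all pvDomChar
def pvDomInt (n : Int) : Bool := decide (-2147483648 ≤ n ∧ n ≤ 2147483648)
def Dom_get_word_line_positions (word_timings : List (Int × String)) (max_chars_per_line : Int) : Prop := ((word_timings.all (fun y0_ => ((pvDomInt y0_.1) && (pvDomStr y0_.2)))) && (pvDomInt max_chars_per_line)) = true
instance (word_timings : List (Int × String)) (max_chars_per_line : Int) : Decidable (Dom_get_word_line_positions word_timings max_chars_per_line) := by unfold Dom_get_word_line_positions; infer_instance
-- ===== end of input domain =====

-- B replaces A's running-counter loop by a two-pass decomposition (group words into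
-- wrapped lines, then emit offsets per line); alternative structure, same cost class.


-- ===== PORT A =====
-- A's loop: running (current_line, current_char) counters, one position appended per word.
def aGo (max_chars_per_line : Int) : List (Int × String) → Int → Int → List (Int × Int)
  | [], _, _ => []
  | (_, w) :: rest, current_line, current_char =>
    let word_len := PySem.Str.len w
    if current_char > 0 ∧ current_char + 1 + word_len > max_chars_per_line then
      (current_line + 1, 0) :: aGo max_chars_per_line rest (current_line + 1) (word_len + 1)
    else
      (current_line, current_char) :: aGo max_chars_per_line rest current_line (current_char + word_len + 1)

def get_word_line_positions (word_timings : List (Int × String)) (max_chars_per_line : Int) : List (Int × Int) :=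
  aGo max_chars_per_line word_timings 0 0

-- ===== PORT B =====
-- chars a line of word lengths consumes (each word plus one trailing space)
def bSumP (cur : List Int) : Int := (cur.map (· + 1)).sum

-- Pass 1: greedily group word lengths into wrapped lines.
def bWrap (max_chars_per_line : Int) : List (Int × String) → List Int → List (List Int)
  | [], current => if current.isEmpty then [] else [current]
  | (_, w) :: rest, current =>
    let n := PySem.Str.len w
    if current.isEmpty = false ∧ bSumP current + 1 + n > max_chars_per_line then
      current :: bWrap max_chars_per_line rest [n]
    else
      bWrap max_chars_per_line rest (current ++ [n])

-- Pass 2 inner loop: offsets within one line.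
def bLine (i : Int) (offset : Int) : List Int → List (Int × Int)
  | [] => []
  | n :: rest => (i, offset) :: bLine i (offset + n + 1) rest

-- Pass 2 outer loop: enumerate the lines.
def bFlatten (i : Int) : List (List Int) → List (Int × Int)
  | [] => []
  | l :: rest => bLine i 0 l ++ bFlatten (i + 1) rest

def get_word_line_positions_alt (word_timings : List (Int × String)) (max_chars_per_line : Int) : List (Int × Int) :=
  bFlatten 0 (bWrap max_chars_per_line word_timings [])

-- ===== PRECONDITION & SPEC =====
def Spec_get_word_line_positions (word_timings : List (Int × String)) (max_chars_per_line : Int) (out : List (Int × Int)) : Prop := out = get_word_line_positions_alt word_timings max_chars_per_line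
instance (word_timings : List (Int × String)) (max_chars_per_line : Int) (out : List (Int × Int)) : Decidable (Spec_get_word_line_positions word_timings max_chars_per_line out) := by unfold Spec_get_word_line_positions; infer_instance

-- ===== CLAIM (what is proved, stated in full; the proofs are below) =====
def Claim_equal_get_word_line_positions : Prop := ∀ (word_timings : List (Int × String)) (max_chars_per_line : Int), Dom_get_word_line_positions word_timings max_chars_per_line → Spec_get_word_line_positions word_timings max_chars_per_line (get_word_line_positions word_timings max_chars_per_line)

-- ===== LEMMAS AND PROOFS =====
theorem bSumP_append (cur : List Int) (n : Int) : bSumP (cur ++ [n]) = bSumP cur + (n + 1) := by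
  simp [bSumP]

theorem bSumP_nonneg (cur : List Int) (h : ∀ x ∈ cur, 0 ≤ x) : 0 ≤ bSumP cur := by
  induction cur with
  | nil => simp [bSumP]
  | cons a t ih =>
    have ha := h a (by simp)
    have ht := ih (fun x hx => h x (by simp [hx]))
    simp only [bSumP, List.map_cons, List.sum_cons] at *
    omega

theorem bSumP_pos (cur : List Int) (hne : cur ≠ []) (h : ∀ x ∈ cur, 0 ≤ x) : 0 < bSumP cur := by
  cases cur with
  | nil => exact absurd rfl hne
  | cons a t =>
    have ha := h a (by simp)
    have ht := bSumP_nonneg t (fun x hx => h x (by simp [hx]))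
    simp only [bSumP, List.map_cons, List.sum_cons] at *
    omega

theorem bLine_append (i offset : Int) (xs : List Int) (n : Int) :
    bLine i offset (xs ++ [n]) = bLine i offset xs ++ [(i, offset + bSumP xs)] := by
  induction xs generalizing offset with
  | nil => simp [bLine, bSumP]
  | cons a t ih =>
    simp only [List.cons_append, bLine, ih, bSumP, List.map_cons, List.sum_cons]
    ring_nf

theorem strLen_nonneg (w : String) : 0 ≤ PySem.Str.len w := by
  have := PySem.Str.len_eq w
  omega

theorem main_lemma (max_chars_per_line : Int) (wt : List (Int × String)) :
    ∀ (cur : List Int) (line : Int), (∀ x ∈ cur, 0 ≤ x) →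
      bFlatten line (bWrap max_chars_per_line wt cur) =
        bLine line 0 cur ++ aGo max_chars_per_line wt line (bSumP cur) := by
  induction wt with
  | nil =>
    intro cur line _
    by_cases hc : cur = []
    · subst hc; simp [bWrap, bFlatten, aGo, bLine]
    · simp [bWrap, bFlatten, aGo, hc, List.isEmpty_iff]
  | cons p rest ih =>
    intro cur line hcur
    obtain ⟨t, w⟩ := p
    have hn : 0 ≤ PySem.Str.len w := strLen_nonneg w
    simp only [bWrap, aGo]
    by_cases hb : cur.isEmpty = false ∧ bSumP cur + 1 + PySem.Str.len w > max_chars_per_line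
    · -- wrap case
      have hne : cur ≠ [] := by
        intro h; rw [h] at hb; simp at hb
      have hpos : 0 < bSumP cur := bSumP_pos cur hne hcur
      rw [if_pos hb, if_pos ⟨hpos, hb.2⟩]
      simp only [bFlatten]
      rw [ih [PySem.Str.len w] (line + 1) (by intro x hx; simp at hx; omega)]
      simp [bLine, bSumP]
    · -- no-wrap case
      have hA : ¬ (bSumP cur > 0 ∧ bSumP cur + 1 + PySem.Str.len w > max_chars_per_line) := by
        intro ⟨h1, h2⟩
        apply hb
        constructor
        · rw [List.isEmpty_eq_false_iff]
          intro h; rw [h] at h1; simp [bSumP] at h1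
        · exact h2
      rw [if_neg hb, if_neg hA]
      rw [ih (cur ++ [PySem.Str.len w]) line
          (by intro x hx; rcases List.mem_append.mp hx with h | h
              · exact hcur x h
              · simp at h; omega)]
      rw [bLine_append, bSumP_append]
      simp [List.append_assoc]
      ring_nf

-- ===== VERDICT (by name: the statement is the Claim_ definition above) =====
theorem get_word_line_positions_spec : Claim_equal_get_word_line_positions := by
  intro wt max _
  unfold Spec_get_word_line_positions get_word_line_positions get_word_line_positions_alt
  rw [main_lemma max wt [] 0 (by simp)]
  simp [bLine, bSumP]
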